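-- pv_equiv track=rewrite | github.com/candidagenome/cgd-backend | cgd/api/routers/homology_router.py | _back_translate_alignment
-- ===== SOURCE A (Python) =====
-- def _back_translate_alignment(
--     protein_alignment: list[tuple[str, str]],
--     coding_sequences: dict[str, str]
-- ) -> list[tuple[str, str]]:
--     """
--     Generate coding sequence alignment by back-translating from protein alignment.
--
--     For each position in the protein alignment:
--     - If amino acid: copy the next 3 nucleotides (one codon)
--     - If gap ('-'): insert '---' (three gaps)
--     """
--     coding_alignment = []
--
--     for seq_id, protein_seq in protein_alignment:
--         coding_seq = coding_sequences.get(seq_id, '')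
--         if not coding_seq:
--             continue
--
--         aligned_coding = []
--         coding_idx = 0
--
--         for aa in protein_seq:
--             if aa == '-':
--                 aligned_coding.append('---')
--             else:
--                 codon_end = coding_idx + 3
--                 if codon_end <= len(coding_seq):
--                     aligned_coding.append(coding_seq[coding_idx:codon_end])
--                 else:
--                     remaining = coding_seq[coding_idx:] if coding_idx < len(coding_seq) else ''
--                     aligned_coding.append(remaining + 'N' * (3 - len(remaining)))
--                 coding_idx += 3
--
--         coding_alignment.append((seq_id, ''.join(aligned_coding)))
--
--     return coding_alignment
-- ===== SOURCE B (Python) =====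
-- def _back_translate_alignment(
--     protein_alignment: list[tuple[str, str]],
--     coding_sequences: dict[str, str]
-- ) -> list[tuple[str, str]]:
--     """Back-translate via a precomputed codon table per sequence."""
--     coding_alignment = []
--     for seq_id, protein_seq in protein_alignment:
--         coding_seq = coding_sequences.get(seq_id, '')
--         if not coding_seq:
--             continue
--         codons = [coding_seq[i:i + 3] for i in range(0, len(coding_seq), 3)]
--         if len(codons[-1]) < 3:
--             codons[-1] += 'N' * (3 - len(codons[-1]))
--         it = iter(codons)
--         parts = ['---' if aa == '-' else next(it, 'NNN') for aa in protein_seq]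
--         coding_alignment.append((seq_id, ''.join(parts)))
--     return coding_alignment
-- ===== Notes on version B (the rewrite author's own statement) =====
-- stated objective: alternative
-- what changed: B precomputes the codon table (3-char chunks, last chunk N-padded) once per sequence and consumes it with an iterator defaulting to 'NNN', replacing A's per-position index arithmetic, bounds tests and slicing.
import Mathlib
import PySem

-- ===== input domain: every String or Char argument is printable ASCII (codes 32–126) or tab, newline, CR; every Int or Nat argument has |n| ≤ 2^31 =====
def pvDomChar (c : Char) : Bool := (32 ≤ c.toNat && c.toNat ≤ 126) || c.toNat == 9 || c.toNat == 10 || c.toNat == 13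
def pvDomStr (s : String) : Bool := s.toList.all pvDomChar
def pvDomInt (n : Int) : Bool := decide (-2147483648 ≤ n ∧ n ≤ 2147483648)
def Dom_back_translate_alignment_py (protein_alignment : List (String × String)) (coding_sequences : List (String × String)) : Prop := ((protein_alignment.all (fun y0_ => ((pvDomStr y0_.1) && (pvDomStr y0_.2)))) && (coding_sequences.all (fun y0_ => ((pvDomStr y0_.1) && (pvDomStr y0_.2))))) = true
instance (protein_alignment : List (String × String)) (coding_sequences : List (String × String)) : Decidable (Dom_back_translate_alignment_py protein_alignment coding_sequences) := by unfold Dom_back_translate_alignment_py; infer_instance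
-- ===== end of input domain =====

-- B replaces A's per-position codon-index arithmetic with a precomputed N-padded codon table consumed sequentially (alternative decomposition, same cost).


-- ===== PORT A =====
-- first-match lookup on the association list = dict.get(seq_id, '')
def pvLookup : List (String × String) → String → String
  | [], _ => ""
  | (k, v) :: rest, key => if k = key then v else pvLookup rest key

-- inner loop of A: walks protein chars keeping the running codon index
-- (coding_idx is always nonnegative in Python, so Nat is exact;
--  coding_seq[i:i+3] for 0 ≤ i is exactly (cs.drop i).take 3)
def pvInnerA (cs : List Char) : List Char → Nat → List (List Char)
  | [], _ => []
  | aa :: rest, idx =>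
    if aa = '-' then
      ['-', '-', '-'] :: pvInnerA cs rest idx
    else
      (if idx + 3 ≤ cs.length then (cs.drop idx).take 3
       else
         let remaining := if idx < cs.length then cs.drop idx else []
         remaining ++ List.replicate (3 - remaining.length) 'N')
      :: pvInnerA cs rest (idx + 3)

def back_translate_alignment_py (protein_alignment : List (String × String)) (coding_sequences : List (String × String)) : List (String × String) :=
  protein_alignment.foldl
    (fun acc p =>
      let cs := (pvLookup coding_sequences p.1).toList
      if cs = [] then acc
      else acc ++ [(p.1, String.ofList (pvInnerA cs p.2.toList 0).flatten)])
    []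


-- ===== PORT B =====
-- codon table: 3-char chunks of the coding sequence, last partial chunk N-padded
def pvChunk3 : List Char → List (List Char)
  | [] => []
  | [a] => [[a, 'N', 'N']]
  | [a, b] => [[a, b, 'N']]
  | a :: b :: c :: rest => [a, b, c] :: pvChunk3 rest

-- inner loop of B: consume the codon table, defaulting to 'NNN' when exhausted
def pvInnerB : List Char → List (List Char) → List (List Char)
  | [], _ => []
  | aa :: rest, codons =>
    if aa = '-' then ['-', '-', '-'] :: pvInnerB rest codons
    else
      match codons with
      | [] => ['N', 'N', 'N'] :: pvInnerB rest []
      | c :: cods => c :: pvInnerB rest cods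

def back_translate_alignment_py_alt (protein_alignment : List (String × String)) (coding_sequences : List (String × String)) : List (String × String) :=
  protein_alignment.flatMap
    (fun p =>
      let cs := (pvLookup coding_sequences p.1).toList
      if cs = [] then []
      else [(p.1, String.ofList (pvInnerB p.2.toList (pvChunk3 cs)).flatten)])


-- ===== PRECONDITION & SPEC =====
def Spec_back_translate_alignment_py (protein_alignment : List (String × String)) (coding_sequences : List (String × String)) (out : List (String × String)) : Prop := out = back_translate_alignment_py_alt protein_alignment coding_sequences
instance (protein_alignment : List (String × String)) (coding_sequences : List (String × String)) (out : List (String × String)) : Decidable (Spec_back_translate_alignment_py protein_alignment coding_sequences out) := by unfold Spec_back_translate_alignment_py; infer_instance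

-- ===== CLAIM (what is proved, stated in full; the proofs are below) =====
def Claim_equal_back_translate_alignment_py : Prop := ∀ (protein_alignment : List (String × String)) (coding_sequences : List (String × String)), Dom_back_translate_alignment_py protein_alignment coding_sequences → Spec_back_translate_alignment_py protein_alignment coding_sequences (back_translate_alignment_py protein_alignment coding_sequences)

-- ===== LEMMAS AND PROOFS =====
lemma pvInner_eq (cs : List Char) (ps : List Char) :
    ∀ k : Nat, pvInnerA cs ps (3 * k) = pvInnerB ps (pvChunk3 (cs.drop (3 * k))) := by
  induction ps with
  | nil => intro k; rfl
  | cons aa rest ih =>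
    intro k
    by_cases hg : aa = '-'
    · simp [pvInnerA, pvInnerB, hg, ih k]
    · have hlen : (cs.drop (3 * k)).length = cs.length - 3 * k := by
        simp
      have hnext : cs.drop (3 * (k + 1)) = (cs.drop (3 * k)).drop 3 := by
        rw [List.drop_drop]; ring_nf
      have ihk : pvInnerA cs rest (3 * k + 3) = pvInnerB rest (pvChunk3 ((cs.drop (3 * k)).drop 3)) := by
        have := ih (k + 1)
        rw [hnext] at this
        rw [← this]; ring_nf
      rcases hd : cs.drop (3 * k) with _ | ⟨a, _ | ⟨b, _ | ⟨c, tail⟩⟩⟩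
      · have h1 : ¬ (3 * k + 3 ≤ cs.length) := by
          rw [hd] at hlen; simp at hlen; omega
        have h2 : ¬ (3 * k < cs.length) := by
          rw [hd] at hlen; simp at hlen; omega
        rw [hd] at ihk
        simp [pvInnerA, pvInnerB, hg, h1, h2, pvChunk3, ihk]
      · have h1 : ¬ (3 * k + 3 ≤ cs.length) := by
          rw [hd] at hlen; simp at hlen; omega
        have h2 : 3 * k < cs.length := by
          rw [hd] at hlen; simp at hlen; omega
        rw [hd] at ihk
        simp [pvInnerA, pvInnerB, hg, h1, h2, pvChunk3, hd, ihk]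
      · have h1 : ¬ (3 * k + 3 ≤ cs.length) := by
          rw [hd] at hlen; simp at hlen; omega
        have h2 : 3 * k < cs.length := by
          rw [hd] at hlen; simp at hlen; omega
        rw [hd] at ihk
        simp [pvInnerA, pvInnerB, hg, h1, h2, pvChunk3, hd, ihk]
      · have h1 : 3 * k + 3 ≤ cs.length := by
          rw [hd] at hlen; simp at hlen; omega
        rw [hd] at ihk
        simp [pvInnerA, pvInnerB, hg, h1, pvChunk3, hd, ihk]

lemma pv_outer (css : List (String × String)) (pa : List (String × String)) :
    ∀ acc : List (String × String),
      List.foldl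
        (fun acc p =>
          let cs := (pvLookup css p.1).toList
          if cs = [] then acc
          else acc ++ [(p.1, String.ofList (pvInnerA cs p.2.toList 0).flatten)])
        acc pa
      = acc ++ pa.flatMap
          (fun p =>
            let cs := (pvLookup css p.1).toList
            if cs = [] then []
            else [(p.1, String.ofList (pvInnerB p.2.toList (pvChunk3 cs)).flatten)]) := by
  induction pa with
  | nil => intro acc; simp
  | cons p rest ih =>
    intro acc
    simp only [List.foldl_cons, List.flatMap_cons]
    by_cases h : (pvLookup css p.1).toList = []
    · simp only [h]
      rw [ih]
      simp
    · simp only [if_neg h]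
      rw [ih]
      have := pvInner_eq (pvLookup css p.1).toList p.2.toList 0
      simp only [Nat.mul_zero, List.drop_zero] at this
      rw [this]
      simp


-- ===== VERDICT (by name: the statement is the Claim_ definition above) =====
theorem back_translate_alignment_py_spec : Claim_equal_back_translate_alignment_py := by
  intro pa css _
  unfold Spec_back_translate_alignment_py back_translate_alignment_py back_translate_alignment_py_alt
  simpa using pv_outer css pa []
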